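-- pv_equiv track=rewrite | github.com/johannes-hp/BoB-thesis | epitome-scripts/epitomes.py | token_counter
-- ===== SOURCE A (Python) =====
-- from collections import Counter
--
-- def token_counter(tokens_list: list[list[str]], stop_list: list[str]) -> Counter:
--     """
--     Takes a list of lists, each sublist containing tokens for a
--     text (see medlatin.generate_text_vectors). Ignores tokens in
--     stop_list. Returns a Counter object of tokens.
--     """
--
--     token_counter = {}
--     for token_list in tokens_list:
--         for token in token_list:
--             if token not in stop_list:
--                 if token in token_counter:
--                     token_counter[token] += 1
--                 else:
--                     token_counter[token] = 1
--
--     return Counter(token_counter)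
-- ===== SOURCE B (Python) =====
-- from collections import Counter
--
-- def token_counter(tokens_list: list[list[str]], stop_list: list[str]) -> Counter:
--     """Count every token in one unconditional pass, then prune the stop words."""
--     c = Counter(tok for sublist in tokens_list for tok in sublist)
--     for word in stop_list:
--         c.pop(word, None)
--     return c
-- ===== Notes on version B (the rewrite author's own statement) =====
-- stated objective: faster
-- what changed: Instead of testing stop-list membership per token inside nested loops while counting, B builds the full Counter of all tokens in one unconditional pass and then removes the stop words in a separate pruning pass over stop_list.
import Mathlib
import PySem

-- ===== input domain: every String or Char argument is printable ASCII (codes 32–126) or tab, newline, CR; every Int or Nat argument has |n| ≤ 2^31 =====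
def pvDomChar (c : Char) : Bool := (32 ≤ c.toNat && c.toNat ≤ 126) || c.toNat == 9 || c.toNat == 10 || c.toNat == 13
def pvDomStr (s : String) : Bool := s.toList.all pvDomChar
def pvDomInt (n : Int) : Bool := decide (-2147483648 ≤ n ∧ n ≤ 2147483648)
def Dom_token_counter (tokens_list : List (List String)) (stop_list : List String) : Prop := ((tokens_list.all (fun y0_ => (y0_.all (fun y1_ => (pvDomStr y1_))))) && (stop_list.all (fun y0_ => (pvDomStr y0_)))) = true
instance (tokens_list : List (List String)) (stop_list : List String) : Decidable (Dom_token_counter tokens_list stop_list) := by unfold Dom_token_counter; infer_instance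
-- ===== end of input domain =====

-- B counts all tokens in one unconditional pass and prunes the stop words in a
-- separate pass, instead of A's per-token stop-list membership test while counting.


-- ===== PORT A =====
def token_counter (tokens_list : List (List String)) (stop_list : List String) : List (String × Int) :=
  let d : PySem.Dict String Int :=
    tokens_list.foldl (fun d token_list =>
      token_list.foldl (fun d token =>
        if !(stop_list.contains token) then
          if d.contains token then
            d.insert token (d.getD token 0 + 1)
          else
            d.insert token 1
        else d) d) PySem.Dict.empty
  d.items

-- ===== PORT B =====
def token_counter_alt (tokens_list : List (List String)) (stop_list : List String) : List (String × Int) :=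
  let c : PySem.Dict String Int :=
    PySem.Dict.counter (tokens_list.flatMap (fun sublist => sublist))
  (stop_list.foldl (fun c word => c.erase word) c).items

-- ===== PRECONDITION & SPEC =====
def Spec_token_counter (tokens_list : List (List String)) (stop_list : List String) (out : List (String × Int)) : Prop := out = token_counter_alt tokens_list stop_list
instance (tokens_list : List (List String)) (stop_list : List String) (out : List (String × Int)) : Decidable (Spec_token_counter tokens_list stop_list out) := by unfold Spec_token_counter; infer_instance

-- ===== CLAIM (what is proved, stated in full; the proofs are below) =====
def Claim_equal_token_counter : Prop := ∀ (tokens_list : List (List String)) (stop_list : List String), Dom_token_counter tokens_list stop_list → Spec_token_counter tokens_list stop_list (token_counter tokens_list stop_list)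

-- ===== LEMMAS AND PROOFS =====

-- A's two-branch counting step is `modify t 0 (·+1)` (in the missing-key branch getD is 0).
theorem stepA_eq_modify (d : PySem.Dict String Int) (t : String) :
    (if d.contains t then d.insert t (d.getD t 0 + 1) else d.insert t 1)
      = d.modify t 0 (· + 1) := by
  by_cases h : d.contains t = true
  · simp [h, PySem.Dict.modify]
  · simp only [Bool.not_eq_true] at h
    simp [h, PySem.Dict.modify, PySem.Dict.getD_of_not_contains d 0 h]

-- Building the ordered key set of a filtered list filters the ordered key set.
theorem set_ofList_filter (p : String → Bool) (l : List String) (s : PySem.Set String) :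
    (l.filter p).foldl PySem.Set.add (s.filter p) = (l.foldl PySem.Set.add s).filter p := by
  induction l generalizing s with
  | nil => rfl
  | cons x xs ih =>
    have hadd : (PySem.Set.add s x).filter p
        = if p x then PySem.Set.add (s.filter p) x else s.filter p := by
      by_cases hm : x ∈ s
      · by_cases hp : p x = true
        · have h2 : x ∈ s.filter p := List.mem_filter.mpr ⟨hm, hp⟩
          simp [PySem.Set.add, hm, h2, hp]
        · simp [PySem.Set.add, hm, hp]
      · by_cases hp : p x = true
        · have h2 : x ∉ s.filter p := fun h => hm (List.mem_filter.mp h).1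
          simp [PySem.Set.add, hm, h2, hp, List.filter_append]
        · simp [PySem.Set.add, hm, hp, List.filter_append]
    by_cases hp : p x = true
    · simp only [List.filter_cons, hp, if_pos, List.foldl_cons]
      rw [show PySem.Set.add (List.filter p s) x = (PySem.Set.add s x).filter p by
        simp [hadd, hp]]
      exact ih (PySem.Set.add s x)
    · simp only [List.filter_cons, hp, if_neg, Bool.false_eq_true, not_false_iff,
        List.foldl_cons]
      rw [show List.filter p s = (PySem.Set.add s x).filter p by simp [hadd, hp]]
      exact ih (PySem.Set.add s x)

-- Erasing one key from a counter is counting the list with that key filtered out.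
theorem counter_erase (l : List String) (w : String) :
    (PySem.Dict.counter l).erase w
      = PySem.Dict.counter (l.filter (fun t => !(t == w))) := by
  apply PySem.Dict.ext
  show ((PySem.Dict.counter l).items).filter (fun p => !(p.1 == w)) = _
  rw [PySem.Dict.items_counter, PySem.Dict.items_counter, List.filter_map]
  have hset : PySem.Set.ofList (l.filter (fun t => !(t == w)))
      = (PySem.Set.ofList l).filter (fun t => !(t == w)) := by
    have h := set_ofList_filter (fun t => !(t == w)) l PySem.Set.empty
    simpa [PySem.Set.ofList, PySem.Set.empty] using h
  rw [hset]
  apply List.map_congr_left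
  intro k hk
  have hkw : (k == w) = false := by
    have := (List.mem_filter.mp hk).2
    simpa using this
  have hc : List.count k (l.filter (fun t => !(t == w))) = List.count k l :=
    List.count_filter (by simp [hkw])
  simp [hc]

-- Pruning the stop words from the full counter counts the stop-filtered list.
theorem prune_counter (sl : List String) :
    ∀ l : List String,
      sl.foldl (fun c word => c.erase word) (PySem.Dict.counter l)
        = PySem.Dict.counter (l.filter (fun t => !(sl.contains t))) := by
  induction sl with
  | nil => intro l; simp
  | cons w sl ih =>
    intro l
    simp only [List.foldl_cons, counter_erase, ih]
    congr 1
    rw [List.filter_filter]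
    apply List.filter_congr
    intro t _
    cases h1 : (t == w) <;> cases h2 : sl.contains t <;> simp_all

theorem token_counter_eq (tl : List (List String)) (sl : List String) :
    token_counter tl sl = token_counter_alt tl sl := by
  show (tl.foldl (fun d token_list =>
      token_list.foldl (fun d token =>
        if !(sl.contains token) then
          if d.contains token then d.insert token (d.getD token 0 + 1)
          else d.insert token 1
        else d) d) PySem.Dict.empty).items
    = (sl.foldl (fun c word => c.erase word)
        (PySem.Dict.counter (tl.flatMap (fun sublist => sublist)))).items
  rw [prune_counter]
  congr 1
  rw [← List.foldl_flatMap]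
  have hfun : (fun (d : PySem.Dict String Int) token =>
        if !(sl.contains token) then
          if d.contains token then d.insert token (d.getD token 0 + 1)
          else d.insert token 1
        else d)
      = (fun (d : PySem.Dict String Int) token =>
          if (fun t => !(sl.contains t)) token then d.modify token 0 (· + 1) else d) := by
    funext d token
    by_cases h : sl.contains token = true <;> simp [stepA_eq_modify]
  rw [hfun, ← List.foldl_filter]
  rfl

-- ===== VERDICT (by name: the statement is the Claim_ definition above) =====
theorem token_counter_spec : Claim_equal_token_counter := by
  intro tl sl _
  unfold Spec_token_counter
  exact token_counter_eq tl sl
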